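-- pv_equiv track=rewrite | github.com/amertzani/CauseTrace | causal_graph.py | _make_acyclic
-- ===== SOURCE A (Python) =====
-- from typing import List, Dict, Tuple, Set, Optional, Any
--
-- def _make_acyclic(edges_list: List[Tuple[int, int]], n_vars: int) -> List[Tuple[int, int]]:
--     """Return a subset of edges that forms a DAG (no cycles)."""
--     # Build adjacency list for the current graph; only add edge (u,v) if no path v -> u
--     adj: Dict[int, List[int]] = {i: [] for i in range(n_vars)}
--
--     def has_path(from_node: int, to_node: int, visited: Set[int]) -> bool:
--         if from_node == to_node:
--             return True
--         visited.add(from_node)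
--         for w in adj.get(from_node, []):
--             if w not in visited and has_path(w, to_node, visited):
--                 return True
--         return False
--
--     acyclic = []
--     for (u, v) in edges_list:
--         if has_path(v, u, set()):
--             continue  # would create cycle
--         acyclic.append((u, v))
--         adj[u].append(v)
--     return acyclic
-- ===== SOURCE B (Python) =====
-- from typing import List, Tuple
--
-- def _make_acyclic(edges_list: List[Tuple[int, int]], n_vars: int) -> List[Tuple[int, int]]:
--     """Return a subset of edges that forms a DAG (no cycles).
--
--     Incremental transitive closure: reach[x] is the set of nodes reachable
--     from x via at least one accepted edge, so each cycle check is O(1)."""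
--     reach = {i: set() for i in range(n_vars)}
--     acyclic = []
--     for (u, v) in edges_list:
--         if u == v or u in reach.get(v, ()):
--             continue  # would create cycle
--         acyclic.append((u, v))
--         newly = reach.get(v, set()) | {v}
--         reach = {x: (rx | newly) if (x == u or u in rx) else rx
--                  for x, rx in reach.items()}
--     return acyclic
-- ===== Notes on version B (the rewrite author's own statement) =====
-- stated objective: alternative
-- what changed: A runs a fresh DFS (with a shared visited set) over the growing adjacency list for every candidate edge; B instead maintains an incremental transitive closure (one reachability set per node, updated when an edge is accepted), so each cycle check is a single set-membership test.
-- outside the precondition, e.g. on _make_acyclic([(0, 5), (5, 0)], 1): A returns [(0, 5)], B returns [(0, 5)]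
import Mathlib
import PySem

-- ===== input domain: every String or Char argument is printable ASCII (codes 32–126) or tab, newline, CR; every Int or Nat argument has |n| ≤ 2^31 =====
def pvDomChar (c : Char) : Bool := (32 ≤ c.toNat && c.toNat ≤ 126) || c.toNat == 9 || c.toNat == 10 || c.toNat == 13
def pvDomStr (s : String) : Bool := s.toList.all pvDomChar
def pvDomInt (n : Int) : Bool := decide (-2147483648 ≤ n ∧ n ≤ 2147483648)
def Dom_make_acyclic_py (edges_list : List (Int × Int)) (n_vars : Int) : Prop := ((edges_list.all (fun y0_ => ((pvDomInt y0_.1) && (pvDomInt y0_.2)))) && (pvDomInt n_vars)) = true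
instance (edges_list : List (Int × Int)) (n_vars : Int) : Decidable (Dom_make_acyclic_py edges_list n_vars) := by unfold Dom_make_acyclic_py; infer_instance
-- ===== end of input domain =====

-- B replaces A's per-edge DFS by incrementally maintained reachability sets (one set per
-- node), so the per-edge cycle test becomes a single membership test (objective: alternative).

-- ===== PORT A =====
-- has_path: DFS with a shared mutable `visited` set, threaded through the recursion.
-- The `fuel` argument is only a termination guard: the recursion depth of the Python is
-- bounded by the number of distinct nodes, which is < fuel at every call site (proved below).
mutual
def pvHpF (adj : PySem.Dict Int (List Int)) : Nat → Int → Int → PySem.Set Int → Bool × PySem.Set Int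
  | 0, _, _, vis => (false, vis)
  | fuel+1, f, t, vis =>
    if f = t then (true, vis)
    else pvHpGo adj fuel (PySem.Dict.getD adj f []) t (PySem.Set.add vis f)
  termination_by fuel _ _ _ => (fuel, 0)

-- the `for w in adj.get(from_node, [])` loop with its early `return True`
def pvHpGo (adj : PySem.Dict Int (List Int)) : Nat → List Int → Int → PySem.Set Int → Bool × PySem.Set Int
  | _, [], _, vis => (false, vis)
  | fuel, w :: ws, t, vis =>
    if w ∈ vis then pvHpGo adj fuel ws t vis
    else
      let r := pvHpF adj fuel w t vis
      if r.1 then r else pvHpGo adj fuel ws t r.2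
  termination_by fuel ws _ _ => (fuel, ws.length + 1)
end

def make_acyclic_py (edges_list : List (Int × Int)) (n_vars : Int) : List (Int × Int) :=
  -- {i: [] for i in range(n_vars)}: the keys are distinct, so the comprehension
  -- builds exactly this items list
  let adj0 : PySem.Dict Int (List Int) :=
    PySem.Dict.mk ((PySem.List.pyRange 0 n_vars 1).map (fun i => (i, ([] : List Int))))
  let fuel := edges_list.length + n_vars.toNat + 2
  (edges_list.foldl
    (fun st e =>
      if (pvHpF st.2 fuel e.2 e.1 PySem.Set.empty).1 then st
      else (st.1 ++ [e], st.2.insert e.1 (PySem.Dict.getD st.2 e.1 [] ++ [e.2])))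
    (([] : List (Int × Int)), adj0)).1

-- ===== PORT B =====
-- the dict comprehension {x: rx|newly if (x==u or u in rx) else rx for x, rx in reach.items()}:
-- keys are exactly those of `reach` (distinct), so it builds exactly this items list.
def pvUpdReach (u : Int) (newly : PySem.Set Int) (reach : PySem.Dict Int (PySem.Set Int)) :
    PySem.Dict Int (PySem.Set Int) :=
  PySem.Dict.mk (reach.items.map (fun p =>
    if p.1 = u ∨ u ∈ p.2 then (p.1, PySem.Set.union p.2 newly) else p))

def make_acyclic_py_alt (edges_list : List (Int × Int)) (n_vars : Int) : List (Int × Int) :=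
  -- {i: set() for i in range(n_vars)}: distinct keys again
  let reach0 : PySem.Dict Int (PySem.Set Int) :=
    PySem.Dict.mk ((PySem.List.pyRange 0 n_vars 1).map (fun i => (i, PySem.Set.empty)))
  (edges_list.foldl
    (fun st e =>
      if e.1 = e.2 ∨ e.1 ∈ PySem.Dict.getD st.2 e.2 PySem.Set.empty then st
      else
        let newly := PySem.Set.union (PySem.Dict.getD st.2 e.2 PySem.Set.empty)
          (PySem.Set.ofList [e.2])
        (st.1 ++ [e], pvUpdReach e.1 newly st.2))
    (([] : List (Int × Int)), reach0)).1

-- ===== PRECONDITION & SPEC =====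
-- Pre_ excludes inputs containing a non-self-loop edge whose source lies outside
-- range(n_vars): whenever such an edge is accepted, A's `adj[u].append(v)` raises KeyError
-- (whether it is accepted depends on the earlier edges, so the closed form excludes a few
-- inputs on which A happens to return; B returns the same value on those).
def Pre_make_acyclic_py (edges_list : List (Int × Int)) (n_vars : Int) : Prop :=
  ∀ p ∈ edges_list, p.1 ≠ p.2 → 0 ≤ p.1 ∧ p.1 < n_vars
instance (edges_list : List (Int × Int)) (n_vars : Int) : Decidable (Pre_make_acyclic_py edges_list n_vars) := by unfold Pre_make_acyclic_py; infer_instance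
def pvWitness_make_acyclic_py : (List (Int × Int)) × Int := ([(0, 1), (1, 2), (2, 0), (0, 2)], 3)

def Spec_make_acyclic_py (edges_list : List (Int × Int)) (n_vars : Int) (out : List (Int × Int)) : Prop := out = make_acyclic_py_alt edges_list n_vars
instance (edges_list : List (Int × Int)) (n_vars : Int) (out : List (Int × Int)) : Decidable (Spec_make_acyclic_py edges_list n_vars out) := by unfold Spec_make_acyclic_py; infer_instance

-- ===== CLAIM (what is proved, stated in full; the proofs are below) =====
def Claim_equal_make_acyclic_py : Prop := ∀ (edges_list : List (Int × Int)) (n_vars : Int), Dom_make_acyclic_py edges_list n_vars → Pre_make_acyclic_py edges_list n_vars → Spec_make_acyclic_py edges_list n_vars (make_acyclic_py edges_list n_vars)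

-- ===== LEMMAS AND PROOFS =====

def pvEdge (adj : PySem.Dict Int (List Int)) (a b : Int) : Prop :=
  b ∈ PySem.Dict.getD adj a []
def pvTG (adj : PySem.Dict Int (List Int)) : Int → Int → Prop := Relation.TransGen (pvEdge adj)
def pvRT (adj : PySem.Dict Int (List Int)) : Int → Int → Prop := Relation.ReflTransGen (pvEdge adj)


lemma pvHp_true (adj : PySem.Dict Int (List Int)) (t : Int) :
    ∀ fuel : Nat,
      (∀ f vis, (pvHpF adj fuel f t vis).1 = true → pvRT adj f t) ∧
      (∀ (L : List Int) vis, (pvHpGo adj fuel L t vis).1 = true →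
        ∃ w ∈ L, pvRT adj w t) := by
  intro fuel
  induction fuel with
  | zero =>
    constructor
    · intro f vis h; simp [pvHpF] at h
    · intro L
      induction L with
      | nil => intro vis h; simp [pvHpGo] at h
      | cons w ws ih =>
        intro vis h
        simp only [pvHpGo, pvHpF] at h
        split at h
        · obtain ⟨w', hw', hp⟩ := ih vis h
          exact ⟨w', List.mem_cons_of_mem _ hw', hp⟩
        · obtain ⟨w', hw', hp⟩ := ih vis h
          exact ⟨w', List.mem_cons_of_mem _ hw', hp⟩
  | succ fuel ihf =>
    have hF : ∀ f vis, (pvHpF adj (fuel+1) f t vis).1 = true → pvRT adj f t := by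
      intro f vis h
      simp only [pvHpF] at h
      split at h
      · rename_i hft; subst hft; exact Relation.ReflTransGen.refl
      · obtain ⟨w, hw, hp⟩ := ihf.2 _ _ h
        exact Relation.ReflTransGen.head hw hp
    refine ⟨hF, ?_⟩
    intro L
    induction L with
    | nil => intro vis h; simp [pvHpGo] at h
    | cons w ws ih =>
      intro vis h
      simp only [pvHpGo] at h
      split at h
      · obtain ⟨w', hw', hp⟩ := ih vis h
        exact ⟨w', List.mem_cons_of_mem _ hw', hp⟩
      · split at h
        · rename_i hr
          exact ⟨w, List.mem_cons_self .., hF w vis hr⟩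
        · obtain ⟨w', hw', hp⟩ := ih _ h
          exact ⟨w', List.mem_cons_of_mem _ hw', hp⟩

lemma pvUnseen_dec (U : Finset Int) (vis : PySem.Set Int) (f : Int)
    (hfU : f ∈ U) (hfv : f ∉ vis) :
    (U.filter (fun x => x ∉ PySem.Set.add vis f)).card < (U.filter (fun x => x ∉ vis)).card := by
  apply Finset.card_lt_card
  constructor
  · intro x hx
    simp only [Finset.mem_filter, PySem.Set.mem_add] at hx ⊢
    exact ⟨hx.1, fun h => hx.2 (Or.inl h)⟩
  · intro hsub
    have := hsub (by simp only [Finset.mem_filter]; exact ⟨hfU, hfv⟩)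
    simp [PySem.Set.mem_add] at this

lemma pvUnseen_mono (U : Finset Int) (vis vis' : PySem.Set Int)
    (h : ∀ x ∈ vis, x ∈ vis') :
    (U.filter (fun x => x ∉ vis')).card ≤ (U.filter (fun x => x ∉ vis)).card := by
  apply Finset.card_le_card
  intro x hx
  simp only [Finset.mem_filter] at hx ⊢
  exact ⟨hx.1, fun hv => hx.2 (h x hv)⟩

lemma pvHp_false (adj : PySem.Dict Int (List Int)) (t : Int) (U : Finset Int)
    (hU : ∀ x, ∀ w ∈ PySem.Dict.getD adj x [], w ∈ U) :
    ∀ fuel : Nat,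
      (∀ f vis, f ∈ U → f ∉ vis → (∀ x ∈ vis, x ∈ U) →
        (U.filter (fun x => x ∉ vis)).card < fuel →
        (pvHpF adj fuel f t vis).1 = false →
        (∀ x ∈ vis, x ∈ (pvHpF adj fuel f t vis).2) ∧
        (∀ x ∈ (pvHpF adj fuel f t vis).2, x ∈ U) ∧
        (∀ x ∈ (pvHpF adj fuel f t vis).2, x ∉ vis →
          ∀ w ∈ PySem.Dict.getD adj x [], w ∈ (pvHpF adj fuel f t vis).2) ∧
        (t ∉ vis → t ∉ (pvHpF adj fuel f t vis).2) ∧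
        f ∈ (pvHpF adj fuel f t vis).2) ∧
      (∀ (L : List Int) vis, (∀ w ∈ L, w ∈ U) → (∀ x ∈ vis, x ∈ U) →
        (U.filter (fun x => x ∉ vis)).card < fuel →
        (pvHpGo adj fuel L t vis).1 = false →
        (∀ x ∈ vis, x ∈ (pvHpGo adj fuel L t vis).2) ∧
        (∀ x ∈ (pvHpGo adj fuel L t vis).2, x ∈ U) ∧
        (∀ x ∈ (pvHpGo adj fuel L t vis).2, x ∉ vis →
          ∀ w ∈ PySem.Dict.getD adj x [], w ∈ (pvHpGo adj fuel L t vis).2) ∧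
        (t ∉ vis → t ∉ (pvHpGo adj fuel L t vis).2) ∧
        (∀ w ∈ L, w ∈ (pvHpGo adj fuel L t vis).2)) := by
  intro fuel
  induction fuel with
  | zero =>
    exact ⟨fun f vis _ _ _ hcard => absurd hcard (by omega),
           fun L vis _ _ hcard => absurd hcard (by omega)⟩
  | succ fuel ihf =>
    have hF : ∀ f vis, f ∈ U → f ∉ vis → (∀ x ∈ vis, x ∈ U) →
        (U.filter (fun x => x ∉ vis)).card < fuel + 1 →
        (pvHpF adj (fuel+1) f t vis).1 = false →
        (∀ x ∈ vis, x ∈ (pvHpF adj (fuel+1) f t vis).2) ∧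
        (∀ x ∈ (pvHpF adj (fuel+1) f t vis).2, x ∈ U) ∧
        (∀ x ∈ (pvHpF adj (fuel+1) f t vis).2, x ∉ vis →
          ∀ w ∈ PySem.Dict.getD adj x [], w ∈ (pvHpF adj (fuel+1) f t vis).2) ∧
        (t ∉ vis → t ∉ (pvHpF adj (fuel+1) f t vis).2) ∧
        f ∈ (pvHpF adj (fuel+1) f t vis).2 := by
      intro f vis hfU hfv hvU hcard h
      by_cases hft : f = t
      · simp [pvHpF, hft] at h
      · simp only [pvHpF] at h ⊢
        rw [if_neg hft] at h ⊢
        have hdec := pvUnseen_dec U vis f hfU hfv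
        obtain ⟨ga, gb, gc, gd, ge⟩ := ihf.2 (PySem.Dict.getD adj f []) (PySem.Set.add vis f)
          (hU f)
          (by intro x hx
              rcases (PySem.Set.mem_add _ _ _).1 hx with h' | h'
              · exact hvU x h'
              · exact h' ▸ hfU)
          (by omega) h
        have hvsub : ∀ x ∈ vis, x ∈ (PySem.Set.add vis f : PySem.Set Int) :=
          fun x hx => (PySem.Set.mem_add _ _ _).2 (Or.inl hx)
        have hfin : f ∈ (PySem.Set.add vis f : PySem.Set Int) :=
          (PySem.Set.mem_add _ _ _).2 (Or.inr rfl)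
        refine ⟨fun x hx => ga x (hvsub x hx), gb, ?_, ?_, ga f hfin⟩
        · intro x hxV hxv w hw
          by_cases hxf : x = f
          · exact ge w (hxf ▸ hw)
          · exact gc x hxV (by
              intro hc
              rcases (PySem.Set.mem_add _ _ _).1 hc with h' | h'
              · exact hxv h'
              · exact hxf h') w hw
        · intro htv
          refine gd ?_
          intro hc
          rcases (PySem.Set.mem_add _ _ _).1 hc with h' | h'
          · exact htv h'
          · exact hft (h' ▸ rfl)
    refine ⟨hF, ?_⟩
    intro L
    induction L with
    | nil =>
      intro vis _ hvU _ _
      simp only [pvHpGo]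
      exact ⟨fun x hx => hx, hvU, fun x hx hxv w hw => absurd hx hxv, fun h' => h', by simp⟩
    | cons w ws ih =>
      intro vis hLU hvU hcard h
      by_cases hwv : w ∈ vis
      · simp only [pvHpGo] at h ⊢
        rw [if_pos hwv] at h ⊢
        obtain ⟨ga, gb, gc, gd, ge⟩ := ih vis (fun x hx => hLU x (List.mem_cons_of_mem _ hx)) hvU hcard h
        refine ⟨ga, gb, gc, gd, ?_⟩
        intro w' hw'
        rcases List.mem_cons.1 hw' with h' | h'
        · exact ga w' (h' ▸ hwv)
        · exact ge w' h'
      · cases hr : (pvHpF adj (fuel+1) w t vis).1 with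
        | true =>
          exfalso
          simp only [pvHpGo] at h
          rw [if_neg hwv] at h
          rw [if_pos hr] at h
          rw [hr] at h; simp at h
        | false =>
          simp only [pvHpGo] at h ⊢
          rw [if_neg hwv] at h ⊢
          rw [if_neg (by simp [hr])] at h ⊢
          obtain ⟨fa, fb, fc, fd, fe⟩ := hF w vis (hLU w (List.mem_cons_self ..)) hwv hvU hcard hr
          obtain ⟨ga, gb, gc, gd, ge⟩ := ih (pvHpF adj (fuel+1) w t vis).2
            (fun x hx => hLU x (List.mem_cons_of_mem _ hx)) fb
            (lt_of_le_of_lt (pvUnseen_mono U vis _ fa) hcard) h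
          refine ⟨fun x hx => ga _ (fa x hx), gb, ?_, fun ht => gd (fd ht), ?_⟩
          · intro x hxV hxv w' hw'
            by_cases hx2 : x ∈ (pvHpF adj (fuel+1) w t vis).2
            · exact ga _ (fc x hx2 hxv w' hw')
            · exact gc x hxV hx2 w' hw'
          · intro w' hw'
            rcases List.mem_cons.1 hw' with h' | h'
            · exact h' ▸ ga _ fe
            · exact ge w' h'

lemma pvHpF_decides (adj : PySem.Dict Int (List Int)) (u v : Int) (U : Finset Int)
    (hU : ∀ x, ∀ w ∈ PySem.Dict.getD adj x [], w ∈ U) (hv : v ∈ U)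
    (fuel : Nat) (hfuel : U.card < fuel) :
    (pvHpF adj fuel v u PySem.Set.empty).1 = true ↔ pvRT adj v u := by
  constructor
  · exact (pvHp_true adj u fuel).1 v _
  · intro hrt
    by_contra hne
    have hfalse : (pvHpF adj fuel v u PySem.Set.empty).1 = false := by
      cases hb : (pvHpF adj fuel v u PySem.Set.empty).1
      · rfl
      · exact absurd hb hne
    have hcard : (U.filter (fun x => x ∉ (PySem.Set.empty : PySem.Set Int))).card < fuel := by
      have : (U.filter (fun x => x ∉ (PySem.Set.empty : PySem.Set Int))).card ≤ U.card :=
        Finset.card_filter_le _ _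
      omega
    obtain ⟨ga, gb, gc, gd, ge⟩ := (pvHp_false adj u U hU fuel).1 v PySem.Set.empty hv
      (by simp [PySem.Set.empty]) (by simp [PySem.Set.empty]) hcard hfalse
    -- every node reachable from v stays inside the closed visited set, so u would be in it
    have hstay : ∀ a b : Int, pvRT adj a b → a ∈ (pvHpF adj fuel v u PySem.Set.empty).2 →
        b ∈ (pvHpF adj fuel v u PySem.Set.empty).2 := by
      intro a b hab
      induction hab with
      | refl => exact fun h => h
      | tail hab hbc ihid => exact fun h => gc _ (ihid h) (by simp [PySem.Set.empty]) _ hbc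
    exact gd (by simp [PySem.Set.empty]) (hstay v u hrt ge)

lemma pvEdge_insert (adj : PySem.Dict Int (List Int)) (u v : Int) (x y : Int) :
    pvEdge (adj.insert u (PySem.Dict.getD adj u [] ++ [v])) x y ↔
      pvEdge adj x y ∨ (x = u ∧ y = v) := by
  simp only [pvEdge, PySem.Dict.getD_insert]
  by_cases hx : x = u
  · subst hx
    simp
  · simp [hx]

lemma pvTG_insert (adj : PySem.Dict Int (List Int)) (u v : Int)
    (hvu : ¬ pvRT adj v u) (x y : Int) :
    pvTG (adj.insert u (PySem.Dict.getD adj u [] ++ [v])) x y ↔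
      pvTG adj x y ∨ (pvRT adj x u ∧ pvRT adj v y) := by
  constructor
  · intro h
    induction h with
    | single h' =>
      rcases (pvEdge_insert adj u v _ _).1 h' with he | ⟨hxu, hyv⟩
      · exact Or.inl (Relation.TransGen.single he)
      · exact Or.inr ⟨hxu ▸ Relation.ReflTransGen.refl, hyv ▸ Relation.ReflTransGen.refl⟩
    | tail hxb hby ih =>
      rename_i b c
      rcases (pvEdge_insert adj u v _ _).1 hby with he | ⟨hbu, hcv⟩
      · rcases ih with h1 | ⟨h1, h2⟩
        · exact Or.inl (Relation.TransGen.tail h1 he)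
        · exact Or.inr ⟨h1, Relation.ReflTransGen.tail h2 he⟩
      · rcases ih with h1 | ⟨h1, h2⟩
        · exact Or.inr ⟨(hbu ▸ h1).to_reflTransGen, hcv ▸ Relation.ReflTransGen.refl⟩
        · exact absurd (hbu ▸ h2) hvu
  · intro h
    have hmono : ∀ a b : Int, pvTG adj a b →
        pvTG (adj.insert u (PySem.Dict.getD adj u [] ++ [v])) a b := by
      intro a b hab
      exact Relation.TransGen.mono (fun a b hab => (pvEdge_insert adj u v a b).2 (Or.inl hab)) hab
    have hmonoRT : ∀ a b : Int, pvRT adj a b →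
        pvRT (adj.insert u (PySem.Dict.getD adj u [] ++ [v])) a b := by
      intro a b hab
      exact Relation.ReflTransGen.mono (fun a b hab => (pvEdge_insert adj u v a b).2 (Or.inl hab)) hab
    rcases h with h1 | ⟨h1, h2⟩
    · exact hmono _ _ h1
    · have hedge : pvEdge (adj.insert u (PySem.Dict.getD adj u [] ++ [v])) u v :=
        (pvEdge_insert adj u v u v).2 (Or.inr ⟨rfl, rfl⟩)
      have h1' := hmonoRT _ _ h1
      have h2' := hmonoRT _ _ h2
      exact Relation.TransGen.trans_right h1' (Relation.TransGen.head' hedge h2')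

lemma get?_mk_map_keyfix (g : Int × PySem.Set Int → PySem.Set Int) :
    ∀ (l : List (Int × PySem.Set Int)) (x : Int),
      (PySem.Dict.mk (l.map (fun p => (p.1, g p)))).get? x =
        ((PySem.Dict.mk l).get? x).map (fun s => g (x, s)) := by
  intro l
  induction l with
  | nil => intro x; rfl
  | cons p ps ih =>
    intro x
    rw [List.map_cons, PySem.Dict.get?_mk_cons, PySem.Dict.get?_mk_cons]
    by_cases hx : p.1 = x
    · subst hx; simp
    · simp [hx, ih x]

lemma get?_pvUpdReach (u : Int) (newly : PySem.Set Int)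
    (reach : PySem.Dict Int (PySem.Set Int)) (x : Int) :
    (pvUpdReach u newly reach).get? x =
      (reach.get? x).map (fun s => if x = u ∨ u ∈ s then PySem.Set.union s newly else s) := by
  have h := get?_mk_map_keyfix
    (fun p => if p.1 = u ∨ u ∈ p.2 then PySem.Set.union p.2 newly else p.2) reach.items x
  have heq : (reach.items.map (fun p =>
      if p.1 = u ∨ u ∈ p.2 then (p.1, PySem.Set.union p.2 newly) else p)) =
      (reach.items.map (fun p => (p.1,
        if p.1 = u ∨ u ∈ p.2 then PySem.Set.union p.2 newly else p.2))) := by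
    apply List.map_congr_left
    intro p _
    by_cases hp : p.1 = u ∨ u ∈ p.2
    · simp [hp]
    · simp [hp]
  unfold pvUpdReach
  rw [heq, h]

lemma getD_mk_const {ν : Type} (c : ν) :
    ∀ (l : List (Int × ν)), (∀ p ∈ l, p.2 = c) →
      ∀ x, (PySem.Dict.mk l).getD x c = c := by
  intro l
  induction l with
  | nil => intro _ x; rfl
  | cons p ps ih =>
    intro hl x
    rw [PySem.Dict.getD_eq_get?_getD, PySem.Dict.get?_mk_cons]
    by_cases hp : p.1 = x
    · simp [hp, hl p (List.mem_cons_self ..)]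
    · simp only [beq_iff_eq, hp, if_false]
      rw [← PySem.Dict.getD_eq_get?_getD]
      exact ih (fun q hq => hl q (List.mem_cons_of_mem _ hq)) x

lemma keys_pvUpdReach (u : Int) (newly : PySem.Set Int)
    (reach : PySem.Dict Int (PySem.Set Int)) :
    (pvUpdReach u newly reach).keys = reach.keys := by
  have h : (pvUpdReach u newly reach).items = reach.items.map (fun p =>
      if p.1 = u ∨ u ∈ p.2 then (p.1, PySem.Set.union p.2 newly) else p) := rfl
  simp only [PySem.Dict.keys, h, List.map_map]
  apply List.map_congr_left
  intro p _
  by_cases hp : p.1 = u ∨ u ∈ p.2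
  · simp [hp]
  · simp [hp]

set_option maxHeartbeats 2000000 in
lemma pvMain (n : Int) (U0 : List Int) (fuel : Nat)
    (hfuel : U0.toFinset.card < fuel) :
    ∀ (rest : List (Int × Int)) (accA accB : List (Int × Int))
      (adj : PySem.Dict Int (List Int)) (reach : PySem.Dict Int (PySem.Set Int)),
      accA = accB →
      (∀ e ∈ rest, e.2 ∈ U0 ∧ (e.1 ≠ e.2 → 0 ≤ e.1 ∧ e.1 < n)) →
      (∀ x w, pvEdge adj x w → w ∈ U0) →
      (∀ x : Int, 0 ≤ x ∧ x < n ↔ x ∈ adj.keys) →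
      (∀ x : Int, 0 ≤ x ∧ x < n ↔ x ∈ reach.keys) →
      (∀ x y : Int, y ∈ PySem.Dict.getD reach x PySem.Set.empty ↔ pvTG adj x y) →
      (rest.foldl
        (fun st e =>
          if (pvHpF st.2 fuel e.2 e.1 PySem.Set.empty).1 then st
          else (st.1 ++ [e], st.2.insert e.1 (PySem.Dict.getD st.2 e.1 [] ++ [e.2])))
        (accA, adj)).1 =
      (rest.foldl
        (fun st e =>
          if e.1 = e.2 ∨ e.1 ∈ PySem.Dict.getD st.2 e.2 PySem.Set.empty then st
          else
            let newly := PySem.Set.union (PySem.Dict.getD st.2 e.2 PySem.Set.empty)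
              (PySem.Set.ofList [e.2])
            (st.1 ++ [e], pvUpdReach e.1 newly st.2))
        (accB, reach)).1 := by
  intro rest
  induction rest with
  | nil => intro accA accB adj reach hacc _ _ _ _ _; simpa using hacc
  | cons e rest ih =>
    intro accA accB adj reach hacc hrest hInvU hkA hkB hInv
    have hU : ∀ x, ∀ w ∈ PySem.Dict.getD adj x [], w ∈ U0.toFinset := by
      intro x w hw
      exact List.mem_toFinset.2 (hInvU x w hw)
    have he := hrest e (List.mem_cons_self ..)
    have hvU : e.2 ∈ U0.toFinset := List.mem_toFinset.2 he.1
    have hdec := pvHpF_decides adj e.1 e.2 U0.toFinset hU hvU fuel hfuel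
    have htest : (pvHpF adj fuel e.2 e.1 PySem.Set.empty).1 = true ↔
        (e.1 = e.2 ∨ e.1 ∈ PySem.Dict.getD reach e.2 PySem.Set.empty) := by
      rw [hdec, pvRT, Relation.reflTransGen_iff_eq_or_transGen]
      constructor
      · rintro (h | h)
        · exact Or.inl h
        · exact Or.inr ((hInv e.2 e.1).2 h)
      · rintro (h | h)
        · exact Or.inl h
        · exact Or.inr ((hInv e.2 e.1).1 h)
    simp only [List.foldl_cons]
    by_cases hacc1 : e.1 = e.2 ∨ e.1 ∈ PySem.Dict.getD reach e.2 PySem.Set.empty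
    · rw [if_pos (htest.2 hacc1), if_pos hacc1]
      exact ih accA accB adj reach hacc (fun e' he' => hrest e' (List.mem_cons_of_mem _ he')) hInvU hkA hkB hInv
    · have htestA : ¬ (pvHpF adj fuel e.2 e.1 PySem.Set.empty).1 = true := fun h => hacc1 (htest.1 h)
      rw [if_neg (by simpa using htestA), if_neg hacc1]
      have hnRT : ¬ pvRT adj e.2 e.1 := fun h => htestA (hdec.2 h)
      have hneq : e.1 ≠ e.2 := fun h => hacc1 (Or.inl h)
      have hbound := he.2 hneq
      have hukA : e.1 ∈ adj.keys := (hkA e.1).1 hbound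
      have hukB : e.1 ∈ reach.keys := (hkB e.1).1 hbound
      set u := e.1 with hu
      set v := e.2 with hv
      set adj' := adj.insert u (PySem.Dict.getD adj u [] ++ [v]) with hadj'
      set newly := PySem.Set.union (PySem.Dict.getD reach v PySem.Set.empty)
        (PySem.Set.ofList [v]) with hnewly
      set reach' := pvUpdReach u newly reach with hreach'
      apply ih (accA ++ [e]) (accB ++ [e]) adj' reach' (by rw [hacc])
        (fun e' he' => hrest e' (List.mem_cons_of_mem _ he'))
      · -- edges of adj' still land in U0
        intro x w hw
        rcases (pvEdge_insert adj u v x w).1 hw with h' | ⟨_, h2⟩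
        · exact hInvU x w h'
        · exact h2 ▸ he.1
      · -- keys of adj' unchanged
        intro x
        rw [PySem.Dict.keys_insert_of_contains adj _ ((PySem.Dict.contains_iff_mem_keys adj u).2 hukA)]
        exact hkA x
      · -- keys of reach' unchanged
        intro x
        rw [hreach', keys_pvUpdReach]
        exact hkB x
      · -- the reachability invariant after adding edge u → v
        intro x y
        rw [hreach', PySem.Dict.getD_eq_get?_getD, get?_pvUpdReach]
        rw [hadj', pvTG_insert adj u v hnRT x y]
        have hRTxu : pvRT adj x u ↔ (x = u ∨ u ∈ PySem.Dict.getD reach x PySem.Set.empty) := by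
          rw [pvRT, Relation.reflTransGen_iff_eq_or_transGen]
          constructor
          · rintro (h | h)
            · exact Or.inl h.symm
            · exact Or.inr ((hInv x u).2 h)
          · rintro (h | h)
            · exact Or.inl h.symm
            · exact Or.inr ((hInv x u).1 h)
        have hRTvy : pvRT adj v y ↔ (y = v ∨ y ∈ PySem.Dict.getD reach v PySem.Set.empty) := by
          rw [pvRT, Relation.reflTransGen_iff_eq_or_transGen]
          constructor
          · rintro (h | h)
            · exact Or.inl h
            · exact Or.inr ((hInv v y).2 h)
          · rintro (h | h)
            · exact Or.inl h
            · exact Or.inr ((hInv v y).1 h)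
        by_cases hxk : x ∈ reach.keys
        · obtain ⟨s, hs⟩ : ∃ s, reach.get? x = some s := by
            cases hgs : reach.get? x with
            | none => exact absurd ((PySem.Dict.get?_eq_none_iff_not_mem_keys reach x).1 hgs) (by simp [hxk])
            | some s => exact ⟨s, rfl⟩
          have hsgetD : PySem.Dict.getD reach x PySem.Set.empty = s := by
            rw [PySem.Dict.getD_eq_get?_getD, hs]; rfl
          rw [hs]
          simp only [Option.map_some, Option.getD_some]
          rw [← hInv x y, hsgetD]
          rw [hRTxu, hRTvy, hsgetD]
          by_cases hcond : x = u ∨ u ∈ s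
          · rw [if_pos hcond]
            rw [PySem.Set.mem_union, hnewly, PySem.Set.mem_union, PySem.Set.mem_ofList]
            simp only [List.mem_singleton]
            tauto
          · rw [if_neg hcond]
            tauto
        · have hnone : reach.get? x = none :=
            (PySem.Dict.get?_eq_none_iff_not_mem_keys reach x).2 hxk
          have hgetD : PySem.Dict.getD reach x PySem.Set.empty = PySem.Set.empty := by
            rw [PySem.Dict.getD_eq_get?_getD, hnone]; rfl
          rw [hnone]
          simp only [Option.map_none, Option.getD_none]
          rw [← hInv x y, hgetD, hRTxu, hgetD]
          have hxu : x ≠ u := fun h => hxk (h ▸ hukB)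
          simp [PySem.Set.empty, hxu]

theorem pvFinal (edges_list : List (Int × Int)) (n_vars : Int)
    (hpre : ∀ p ∈ edges_list, p.1 ≠ p.2 → 0 ≤ p.1 ∧ p.1 < n_vars) :
    make_acyclic_py edges_list n_vars = make_acyclic_py_alt edges_list n_vars := by
  unfold make_acyclic_py make_acyclic_py_alt
  set U0 : List Int := PySem.List.pyRange 0 n_vars 1 ++ edges_list.map (·.2) with hU0
  have hlen : (PySem.List.pyRange 0 n_vars 1).length = n_vars.toNat := by
    simp [PySem.List.pyRange]; omega
  have hfuel : U0.toFinset.card < edges_list.length + n_vars.toNat + 2 := by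
    have h1 : U0.toFinset.card ≤ U0.length := List.toFinset_card_le U0
    have h2 : U0.length = n_vars.toNat + edges_list.length := by
      simp [hU0, hlen]
    omega
  have hkeys0 : ∀ {ν : Type} (c : ν),
      (PySem.Dict.mk ((PySem.List.pyRange 0 n_vars 1).map (fun i => (i, c)))).keys
        = PySem.List.pyRange 0 n_vars 1 := by
    intro ν c
    simp [PySem.Dict.keys, List.map_map, Function.comp_def]
  have hadj0 : ∀ x : Int, PySem.Dict.getD
      (PySem.Dict.mk ((PySem.List.pyRange 0 n_vars 1).map (fun i => (i, ([] : List Int))))) x [] = [] :=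
    getD_mk_const [] _ (by intro p hp; rcases List.mem_map.1 hp with ⟨i, _, rfl⟩; rfl)
  have hreach0 : ∀ x : Int, PySem.Dict.getD
      (PySem.Dict.mk ((PySem.List.pyRange 0 n_vars 1).map (fun i => (i, PySem.Set.empty)))) x PySem.Set.empty = PySem.Set.empty :=
    getD_mk_const (PySem.Set.empty : PySem.Set Int) _
      (by intro p hp; rcases List.mem_map.1 hp with ⟨i, _, rfl⟩; rfl)
  apply pvMain n_vars U0 (edges_list.length + n_vars.toNat + 2) hfuel edges_list [] []
  · rfl
  · intro e he
    refine ⟨List.mem_append.2 (Or.inr (List.mem_map.2 ⟨e, he, rfl⟩)), hpre e he⟩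
  · intro x w hw
    rw [pvEdge, hadj0 x] at hw
    simp at hw
  · intro x
    rw [hkeys0, PySem.List.mem_pyRange_one]
  · intro x
    rw [hkeys0, PySem.List.mem_pyRange_one]
  · intro x y
    rw [hreach0 x]
    constructor
    · intro h; simp [PySem.Set.empty] at h
    · intro h
      exfalso
      induction h with
      | single h' => rw [pvEdge, hadj0 x] at h'; simp at h'
      | tail _ h' ih => exact ih

-- ===== VERDICT (by name: the statement is the Claim_ definition above) =====
theorem make_acyclic_py_spec : Claim_equal_make_acyclic_py := by
  intro edges_list n_vars _ hpre
  unfold Spec_make_acyclic_py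
  exact pvFinal edges_list n_vars hpre
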